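-- pv_equiv track=rewrite | github.com/QuentinBeauchet/ProjetTATIA | projet.py | negOrPosOrNeutral
-- ===== SOURCE A (Python) =====
-- def negOrPosOrNeutral(array):
--     res = 0
--     for i in array:
--         if i == "negative":
--             res -= 1
--         elif i == "positive":
--             res += 1
--     if res > 0:
--         return "positive"
--     elif res < 0:
--         return "negative"
--     else:
--         return "neutral"
-- ===== SOURCE B (Python) =====
-- def negOrPosOrNeutral(array):
--     # Sort the relevant labels; the verdict is the median of the sorted list:
--     # "negative" sorts before "positive", so the longer block owns the middle.
--     ys = sorted(x for x in array if x == "negative" or x == "positive")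
--     if not ys:
--         return "neutral"
--     m = len(ys)
--     mid = ys[m // 2]
--     if m % 2 == 0 and ys[m // 2 - 1] != mid:
--         return "neutral"
--     return mid
-- ===== Notes on version B (the rewrite author's own statement) =====
-- stated objective: alternative
-- what changed: Replaces the signed-score accumulator with an order-statistics algorithm: filter the two labels, sort them, and read the verdict from the median element(s) of the sorted list (equal middle pair or odd median = majority label, differing middle pair = tie = neutral); no counting at all.
import Mathlib
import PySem

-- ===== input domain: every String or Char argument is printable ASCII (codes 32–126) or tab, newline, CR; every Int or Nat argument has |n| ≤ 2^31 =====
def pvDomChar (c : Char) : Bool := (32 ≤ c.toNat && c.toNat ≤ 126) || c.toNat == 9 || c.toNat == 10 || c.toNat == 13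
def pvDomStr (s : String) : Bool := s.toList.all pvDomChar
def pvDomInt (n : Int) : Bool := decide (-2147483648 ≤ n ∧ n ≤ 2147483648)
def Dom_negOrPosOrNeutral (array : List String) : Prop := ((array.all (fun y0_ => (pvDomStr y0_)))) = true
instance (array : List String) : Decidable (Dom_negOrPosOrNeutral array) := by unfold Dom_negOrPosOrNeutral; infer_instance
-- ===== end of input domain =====

-- B replaces A's signed-score accumulator with an order-statistics algorithm: sort the relevant
-- labels and read the verdict off the median element(s) of the sorted list (alternative; no speed claim).

-- ===== PORT A =====
def negOrPosOrNeutral (array : List String) : String :=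
  let res : Int := array.foldl (fun res i =>
    if i = "negative" then res - 1
    else if i = "positive" then res + 1
    else res) 0
  if res > 0 then "positive"
  else if res < 0 then "negative"
  else "neutral"

-- ===== PORT B =====
def negOrPosOrNeutral_alt (array : List String) : String :=
  let ys := PySem.List.sorted (array.filter (fun x => x = "negative" || x = "positive")) (fun x => x) false
  if ys = [] then "neutral"
  else
    let m : Int := ys.length
    -- ys[m // 2] and ys[m // 2 - 1]: in the Python both indices are in range whenever evaluated,
    -- so pyGetD is exact there (the second is only reached when m is even, hence m ≥ 2)
    let mid := PySem.List.pyGetD ys (PySem.Int.floordiv m 2) ""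
    if PySem.Int.mod m 2 = 0 ∧ PySem.List.pyGetD ys (PySem.Int.floordiv m 2 - 1) "" ≠ mid then "neutral"
    else mid

-- ===== PRECONDITION & SPEC =====
def Spec_negOrPosOrNeutral (array : List String) (out : String) : Prop := out = negOrPosOrNeutral_alt array
instance (array : List String) (out : String) : Decidable (Spec_negOrPosOrNeutral array out) := by unfold Spec_negOrPosOrNeutral; infer_instance

-- ===== CLAIM (what is proved, stated in full; the proofs are below) =====
def Claim_equal_negOrPosOrNeutral : Prop := ∀ (array : List String), Dom_negOrPosOrNeutral array → Spec_negOrPosOrNeutral array (negOrPosOrNeutral array)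

-- ===== LEMMAS AND PROOFS =====

-- A's accumulator equals (#positive − #negative), shifted by the starting value.
theorem pv_fold_eq_counts (array : List String) (r : Int) :
    array.foldl (fun res i =>
      if i = "negative" then res - 1
      else if i = "positive" then res + 1
      else res) r
    = r + (array.count "positive" : Int) - (array.count "negative" : Int) := by
  induction array generalizing r with
  | nil => simp
  | cons x xs ih =>
    simp only [List.foldl_cons, ih, List.count_cons]
    by_cases hn : x = "negative"
    · simp [hn]; omega
    · by_cases hp : x = "positive"
      · simp [hp]; omega
      · simp [hn, hp]

-- Any list drawing from {negative, positive} is a permutation of the two blocks.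
theorem pv_perm_blocks (l : List String)
    (h : ∀ x ∈ l, x = "negative" ∨ x = "positive") :
    (List.replicate (l.count "negative") "negative" ++
     List.replicate (l.count "positive") "positive").Perm l := by
  induction l with
  | nil => simp
  | cons x t ih =>
    have ht : ∀ y ∈ t, y = "negative" ∨ y = "positive" := fun y hy => h y (List.mem_cons_of_mem _ hy)
    rcases h x (List.mem_cons_self) with hx | hx
    · subst hx
      have h1 : ("negative":String) ≠ "positive" := by decide
      rw [List.count_cons_self, List.count_cons_of_ne h1, List.replicate_succ, List.cons_append]
      exact (ih ht).cons _
    · subst hx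
      have h1 : ("positive":String) ≠ "negative" := by decide
      rw [List.count_cons_of_ne h1, List.count_cons_self, List.replicate_succ]
      exact (List.perm_middle).trans ((ih ht).cons _)

-- getD of the two-block list.
theorem pv_getD_blocks (a b n : Nat) (d : String) :
    (List.replicate a "negative" ++ List.replicate b "positive").getD n d
    = if n < a then "negative" else if n < a + b then "positive" else d := by
  rcases Nat.lt_or_ge n a with h | h
  · rw [List.getD_eq_getElem?_getD, List.getElem?_append_left (by simpa using h)]
    simp [h]
  · rw [List.getD_eq_getElem?_getD, List.getElem?_append_right (by simpa using h)]
    rcases Nat.lt_or_ge n (a + b) with h2 | h2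
    · simp [Nat.sub_lt_left_of_lt_add h h2, h2, Nat.not_lt.mpr h]
    · have : ¬ (n - a < b) := by omega
      simp [this, Nat.not_lt.mpr h, Nat.not_lt.mpr h2]

-- count commutes with the filter (the filter keeps every occurrence of each label).
theorem pv_count_filter (array : List String) (s : String)
    (hs : (s = "negative" || s = "positive") = true) :
    (array.filter (fun x => x = "negative" || x = "positive")).count s = array.count s := by
  induction array with
  | nil => rfl
  | cons x t ih =>
    by_cases hx : ((x = "negative" || x = "positive") : Bool) = true
    · rw [show (x :: t).filter (fun x => x = "negative" || x = "positive")
            = x :: t.filter (fun x => x = "negative" || x = "positive") from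
          List.filter_cons_of_pos (by simpa using hx), List.count_cons, List.count_cons, ih]
    · rw [show (x :: t).filter (fun x => x = "negative" || x = "positive")
            = t.filter (fun x => x = "negative" || x = "positive") from
          List.filter_cons_of_neg (by simpa using hx), List.count_cons, ih]
      have : ¬ x = s := fun he => hx (he ▸ hs)
      simp [this]

-- The sorted filtered list is the negative block followed by the positive block.
theorem pv_sorted_eq (array : List String) :
    PySem.List.sorted (array.filter (fun x => x = "negative" || x = "positive")) (fun x => x) false
    = List.replicate (array.count "negative") "negative" ++
      List.replicate (array.count "positive") "positive" := by
  rw [← pv_count_filter array "negative" (by decide), ← pv_count_filter array "positive" (by decide)]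
  apply PySem.List.sorted_id_eq_of_perm_of_pairwise
  · exact pv_perm_blocks _ (by
      intro x hx
      have := List.of_mem_filter hx
      simpa using this)
  · rw [List.pairwise_append]
    refine ⟨List.pairwise_replicate.mpr (Or.inr le_rfl),
            List.pairwise_replicate.mpr (Or.inr le_rfl), ?_⟩
    intro a ha b hb
    rw [List.eq_of_mem_replicate ha, List.eq_of_mem_replicate hb,
        String.le_iff_toList_le]
    decide

-- B computed as the sign comparison of the two counts.
theorem pv_main (array : List String) :
    negOrPosOrNeutral_alt array =
      (if ((array.count "positive" : Int) - (array.count "negative" : Int)) > 0 then "positive"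
       else if ((array.count "positive" : Int) - (array.count "negative" : Int)) < 0 then "negative"
       else "neutral") := by
  unfold negOrPosOrNeutral_alt
  rw [pv_sorted_eq]
  set a := array.count "negative" with ha
  set b := array.count "positive" with hb
  clear ha hb
  by_cases hz : a + b = 0
  · have ha0 : a = 0 := by omega
    have hb0 : b = 0 := by omega
    simp [ha0, hb0]
  · have hne : (List.replicate a "negative" ++ List.replicate b "positive") ≠ [] := by
      intro h
      apply hz
      have := congrArg List.length h
      simpa using this
    rw [if_neg hne]
    have hlen : ((List.replicate a "negative" ++ List.replicate b "positive").length : Int)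
        = ((a + b : Nat) : Int) := by simp
    have hdiv : PySem.Int.floordiv ((a+b : Nat) : Int) 2 = (((a+b)/2 : Nat) : Int) := by
      exact_mod_cast PySem.Int.floordiv_natCast (a+b) 2
    have hmod : PySem.Int.mod ((a+b : Nat) : Int) 2 = (((a+b)%2 : Nat) : Int) := by
      exact_mod_cast PySem.Int.mod_natCast (a+b) 2
    simp only [hlen, hdiv, hmod, PySem.List.pyGetD_natCast, pv_getD_blocks]
    rcases lt_trichotomy a b with hab | hab | hab
    · -- more positives: median is "positive"
      rw [if_neg (by omega : ¬ ((a+b)/2 < a)), if_pos (by omega : (a+b)/2 < a + b)]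
      by_cases hpar : (a+b) % 2 = 0
      · have h1 : 1 ≤ (a+b)/2 := by omega
        rw [show ((((a+b)/2 : Nat)) : Int) - 1 = ((((a+b)/2 - 1 : Nat)) : Int) by omega,
            PySem.List.pyGetD_natCast, pv_getD_blocks,
            if_neg (by omega : ¬ ((a+b)/2 - 1 < a)), if_pos (by omega : (a+b)/2 - 1 < a + b)]
        rw [if_neg (by simp), if_pos (by omega : (b:Int) - a > 0)]
      · have hmz : (((a+b)%2 : Nat) : Int) ≠ 0 := by omega
        rw [if_neg (fun h => hmz h.1), if_pos (by omega : (b:Int) - a > 0)]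
    · -- tie: the middle pair straddles the block boundary
      rcases Nat.eq_zero_or_pos a with h0 | h1
      · omega
      · have hpar : (a+b) % 2 = 0 := by omega
        rw [if_neg (by omega : ¬ ((a+b)/2 < a)), if_pos (by omega : (a+b)/2 < a + b)]
        rw [show ((((a+b)/2 : Nat)) : Int) - 1 = ((((a+b)/2 - 1 : Nat)) : Int) by omega,
            PySem.List.pyGetD_natCast, pv_getD_blocks,
            if_pos (by omega : (a+b)/2 - 1 < a)]
        rw [if_pos ⟨by simp [hpar], by decide⟩,
            if_neg (by omega : ¬ ((b:Int) - a > 0)), if_neg (by omega : ¬ ((b:Int) - a < 0))]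
    · -- more negatives: median is "negative"
      rw [if_pos (by omega : (a+b)/2 < a)]
      by_cases hpar : (a+b) % 2 = 0
      · have h1 : 1 ≤ (a+b)/2 := by omega
        rw [show ((((a+b)/2 : Nat)) : Int) - 1 = ((((a+b)/2 - 1 : Nat)) : Int) by omega,
            PySem.List.pyGetD_natCast, pv_getD_blocks,
            if_pos (by omega : (a+b)/2 - 1 < a)]
        rw [if_neg (by simp), if_neg (by omega : ¬ ((b:Int) - a > 0)),
            if_pos (by omega : (b:Int) - a < 0)]
      · have hmz : (((a+b)%2 : Nat) : Int) ≠ 0 := by omega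
        rw [if_neg (fun h => hmz h.1), if_neg (by omega : ¬ ((b:Int) - a > 0)),
            if_pos (by omega : (b:Int) - a < 0)]

-- ===== VERDICT (by name: the statement is the Claim_ definition above) =====
theorem negOrPosOrNeutral_spec : Claim_equal_negOrPosOrNeutral := by
  intro array _
  show negOrPosOrNeutral array = negOrPosOrNeutral_alt array
  rw [pv_main]
  unfold negOrPosOrNeutral
  simp only [pv_fold_eq_counts, zero_add]
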